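-- pv_equiv track=rewrite | github.com/382335657/pythonHomework | Code/CodeRecords/2778/60672/320085.py | find
-- ===== SOURCE A (Python) =====
-- def find(n,m):
--     string=[]
--     count=0
--     for i in range(n,m+1):
--         string=list(str(i))
--         if len(string)<2:
--             count+=1
--         else:
--             if string[0]==string[-1]:
--                 count+=1
--     return count
-- ===== SOURCE B (Python) =====
-- def _f(x):
--     # number of k in [0, x] whose decimal first digit equals its last digit
--     if x < 0:
--         return 0
--     if x < 10:
--         return x + 1
--     total = 10            # the one-digit numbers 0..9
--     p = 1                 # 10^(digits-2) so far
--     t = x // 10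
--     while t >= 10:        # add the full shorter lengths, find the leading digit
--         total += 9 * p
--         p *= 10
--         t //= 10
--     a = t                 # leading digit of x
--     total += (a - 1) * p  # same length, smaller leading digit
--     r = x - a * (p * 10)  # x with its leading digit removed
--     if r >= a:            # leading digit a: middles 0..(r-a)//10 fit under x
--         total += (r - a) // 10 + 1
--     return total
--
--
-- def find(n, m):
--     lo = 0 if n < 0 else n
--     if lo > m:
--         return 0
--     return _f(m) - _f(lo - 1)
-- ===== Notes on version B (the rewrite author's own statement) =====
-- stated objective: faster
-- what changed: Replaced the per-element scan of [n,m] that stringifies every integer with a closed-form digit-bucket count f(x) of matching numbers in [0,x] (negatives never match since their string starts with '-'), returning f(m)-f(max(n,0)-1).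
import Mathlib
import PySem

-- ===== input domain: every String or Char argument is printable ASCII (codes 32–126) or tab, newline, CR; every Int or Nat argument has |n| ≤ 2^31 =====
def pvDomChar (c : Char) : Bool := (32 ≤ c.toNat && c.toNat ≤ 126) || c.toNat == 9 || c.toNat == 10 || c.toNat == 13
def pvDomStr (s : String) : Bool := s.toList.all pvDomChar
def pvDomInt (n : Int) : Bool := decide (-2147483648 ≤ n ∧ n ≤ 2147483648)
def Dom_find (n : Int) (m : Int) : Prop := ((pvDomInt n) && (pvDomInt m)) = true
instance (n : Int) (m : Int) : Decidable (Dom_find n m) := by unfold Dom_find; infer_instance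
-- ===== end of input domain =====

-- B replaces A's per-element scan of [n,m] (stringify every i, compare first and last character)
-- by a closed-form digit-bucket count f(x) of matching numbers in [0,x], returning f(m) - f(max(n,0)-1).

-- ===== PORT A =====
def find (n : Int) (m : Int) : Int :=
  -- 'string=[]' is dead initial state in A; the loop rebinds it each iteration
  (PySem.List.pyRange n (m + 1)).foldl
    (fun count i =>
      let string := (PySem.Int.toStr i).toList
      if PySem.List.len string < 2 then count + 1
      else if PySem.List.pyGetD string 0 ' ' = PySem.List.pyGetD string (-1) ' ' then count + 1
      else count)
    0

-- ===== PORT B =====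
def fLoopB (total : Int) (p : Int) (t : Int) : Int × Int × Int :=
  if h : 10 ≤ t then
    fLoopB (total + 9 * p) (p * 10) (PySem.Int.floordiv t 10)
  else (total, p, t)
termination_by t.toNat
decreasing_by
  have h10 : PySem.Int.floordiv t 10 = t / 10 := PySem.Int.floordiv_eq_ediv_of_pos (by omega)
  rw [h10]; omega

def fB (x : Int) : Int :=
  if x < 0 then 0
  else if x < 10 then x + 1
  else
    let s := fLoopB 10 1 (PySem.Int.floordiv x 10)
    let a := s.2.2
    let total := s.1 + (a - 1) * s.2.1
    let r := x - a * (s.2.1 * 10)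
    if r ≥ a then total + (PySem.Int.floordiv (r - a) 10 + 1) else total

def find_alt (n : Int) (m : Int) : Int :=
  let lo := if n < 0 then 0 else n
  if lo > m then 0 else fB m - fB (lo - 1)


-- ===== PRECONDITION & SPEC =====
def Spec_find (n : Int) (m : Int) (out : Int) : Prop := out = find_alt n m
instance (n : Int) (m : Int) (out : Int) : Decidable (Spec_find n m out) := by unfold Spec_find; infer_instance

-- ===== CLAIM (what is proved, stated in full; the proofs are below) =====
def Claim_equal_find : Prop := ∀ (n : Int) (m : Int), Dom_find n m → Spec_find n m (find n m)

-- ===== LEMMAS AND PROOFS =====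

-- leading decimal digit of a natural number
def leadN (n : Nat) : Nat := n / 10 ^ Nat.log 10 n

-- the amount A's loop body adds for element i ("first digit equals last digit", arithmetically)
def ind (i : Int) : Int :=
  if 0 ≤ i ∧ (i < 10 ∨ leadN i.toNat = i.toNat % 10) then 1 else 0

-- sum of ind over the integer interval [a, b]
def sumInd (a : Int) (b : Int) : Int :=
  if b < a then 0 else sumInd a (b - 1) + ind b
termination_by (b + 1 - a).toNat
decreasing_by omega

lemma sumInd_step (a b : Int) (h : a ≤ b) : sumInd a b = sumInd a (b - 1) + ind b := by
  rw [sumInd, if_neg (by omega)]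

-- ---- facts about Nat.toDigits 10 (the digit list of str(i)) ----

lemma tdc_acc : ∀ (f n : Nat) (ds : List Char), n < 10 ^ f →
    Nat.toDigitsCore 10 f n ds = Nat.toDigitsCore 10 f n [] ++ ds := by
  intro f
  induction f with
  | zero => intro n ds h; interval_cases n; simp [Nat.toDigitsCore]
  | succ g ih =>
    intro n ds h
    have hlt : n / 10 < 10 ^ g := by
      rw [Nat.div_lt_iff_lt_mul (by norm_num : 0 < 10)]
      calc n < 10 ^ (g + 1) := h
        _ = 10 ^ g * 10 := by ring
    simp only [Nat.toDigitsCore]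
    by_cases h0 : n / 10 = 0
    · simp [h0]
    · simp only [h0, if_false]
      rw [ih (n / 10) (Nat.digitChar (n % 10) :: ds) hlt, ih (n / 10) [Nat.digitChar (n % 10)] hlt,
        List.append_assoc, List.singleton_append]


lemma tdc_fuel : ∀ (n f1 f2 : Nat), 0 < f1 → 0 < f2 → n < 10 ^ f1 → n < 10 ^ f2 →
    Nat.toDigitsCore 10 f1 n [] = Nat.toDigitsCore 10 f2 n [] := by
  intro n
  induction n using Nat.strong_induction_on with
  | _ n ih =>
    intro f1 f2 hf1 hf2 h1 h2
    obtain ⟨g1, rfl⟩ : ∃ g, f1 = g + 1 := ⟨f1 - 1, by omega⟩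
    obtain ⟨g2, rfl⟩ : ∃ g, f2 = g + 1 := ⟨f2 - 1, by omega⟩
    simp only [Nat.toDigitsCore]
    by_cases h0 : n / 10 = 0
    · simp [h0]
    · simp only [h0, if_false]
      have hn10 : 10 ≤ n := by
        rcases Nat.lt_or_ge n 10 with h | h
        · exact absurd (Nat.div_eq_of_lt h) h0
        · exact h
      have hlt1 : n / 10 < 10 ^ g1 := by
        rw [Nat.div_lt_iff_lt_mul (by norm_num : 0 < 10)]
        calc n < 10 ^ (g1 + 1) := h1
          _ = 10 ^ g1 * 10 := by ring
      have hlt2 : n / 10 < 10 ^ g2 := by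
        rw [Nat.div_lt_iff_lt_mul (by norm_num : 0 < 10)]
        calc n < 10 ^ (g2 + 1) := h2
          _ = 10 ^ g2 * 10 := by ring
      have hg1 : 0 < g1 := by
        by_contra hg; push_neg at hg
        interval_cases g1
        · simp at hlt1; omega
      have hg2 : 0 < g2 := by
        by_contra hg; push_neg at hg
        interval_cases g2
        · simp at hlt2; omega
      rw [tdc_acc g1 (n / 10) _ hlt1, tdc_acc g2 (n / 10) _ hlt2,
        ih (n / 10) (by omega) g1 g2 hg1 hg2 hlt1 hlt2]

lemma toDigits_small {n : Nat} (h : n < 10) : Nat.toDigits 10 n = [Nat.digitChar n] := by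
  simp only [Nat.toDigits, Nat.toDigitsCore, Nat.div_eq_of_lt h, if_true, Nat.mod_eq_of_lt h]

lemma toDigits_step {n : Nat} (h : 10 ≤ n) :
    Nat.toDigits 10 n = Nat.toDigits 10 (n / 10) ++ [Nat.digitChar (n % 10)] := by
  have h0 : ¬ n / 10 = 0 := by omega
  have hself : ∀ m : Nat, m < 10 ^ m.succ := by
    intro m
    calc m < 10 ^ m := Nat.lt_pow_self (by norm_num)
      _ ≤ 10 ^ m.succ := Nat.pow_le_pow_right (by norm_num) (Nat.le_succ m)
  have hd : n / 10 < 10 ^ n := by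
    calc n / 10 ≤ n := Nat.div_le_self n 10
      _ < 10 ^ n := Nat.lt_pow_self (by norm_num)
  simp only [Nat.toDigits, Nat.toDigitsCore, h0, if_false]
  rw [tdc_acc n (n / 10) _ hd]
  congr 1
  exact tdc_fuel (n / 10) n (n / 10 + 1) (by omega) (by omega) hd (hself (n / 10))

lemma toDigits_ne_nil (n : Nat) : Nat.toDigits 10 n ≠ [] := by
  rcases Nat.lt_or_ge n 10 with h | h
  · simp [toDigits_small h]
  · simp [toDigits_step h]

lemma toDigits_getLast? (n : Nat) :
    (Nat.toDigits 10 n).getLast? = some (Nat.digitChar (n % 10)) := by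
  rcases Nat.lt_or_ge n 10 with h | h
  · rw [toDigits_small h, Nat.mod_eq_of_lt h]; rfl
  · rw [toDigits_step h, List.getLast?_concat]

lemma toDigits_head? (n : Nat) :
    (Nat.toDigits 10 n).head? = some (Nat.digitChar (leadN n)) := by
  induction n using Nat.strong_induction_on with
  | _ n ih =>
    rcases Nat.lt_or_ge n 10 with h | h
    · rw [toDigits_small h]
      have : Nat.log 10 n = 0 := Nat.log_eq_zero_iff.mpr (Or.inl h)
      simp [leadN, this]
    · rw [toDigits_step h, List.head?_append,
        ih (n / 10) (by omega)]
      have hlog : Nat.log 10 (n / 10) = Nat.log 10 n - 1 := Nat.log_div_base 10 n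
      have hlog1 : 1 ≤ Nat.log 10 n := by
        rw [← Nat.pow_le_iff_le_log (by norm_num) (by omega)]
        simpa using h
      have : leadN (n / 10) = leadN n := by
        unfold leadN
        rw [hlog, Nat.div_div_eq_div_mul]
        congr 1
        rw [← pow_succ']
        congr 1
        omega
      simp [this]

lemma toDigits_len2 {n : Nat} (h : 10 ≤ n) : 2 ≤ (Nat.toDigits 10 n).length := by
  rw [toDigits_step h, List.length_append]
  have := List.length_pos_iff.mpr (toDigits_ne_nil (n / 10))
  simp; omega

lemma lead_unique {nt a r D : Nat} (hn : nt = a * 10 ^ D + r) (ha1 : 1 ≤ a) (ha9 : a ≤ 9)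
    (hr : r < 10 ^ D) : Nat.log 10 nt = D ∧ leadN nt = a := by
  have hP : 0 < (10:Nat) ^ D := by positivity
  have h1 : 1 * 10 ^ D ≤ a * 10 ^ D := Nat.mul_le_mul_right _ ha1
  have h9 : a * 10 ^ D ≤ 9 * 10 ^ D := Nat.mul_le_mul_right _ ha9
  have hlog : Nat.log 10 nt = D := by
    apply Nat.log_eq_of_pow_le_of_lt_pow
    · omega
    · rw [pow_succ]; omega
  refine ⟨hlog, ?_⟩
  unfold leadN
  rw [hlog, hn, Nat.mul_comm a, Nat.mul_add_div hP, Nat.div_eq_of_lt hr, Nat.add_zero]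

lemma digitChar_inj : ∀ a < 10, ∀ b < 10, Nat.digitChar a = Nat.digitChar b → a = b := by decide
lemma digitChar_ne_dash : ∀ a < 10, Nat.digitChar a ≠ '-' := by decide

lemma leadN_lt (n : Nat) : leadN n < 10 := by
  unfold leadN
  rw [Nat.div_lt_iff_lt_mul (by positivity)]
  calc n < 10 ^ (Nat.log 10 n).succ := Nat.lt_pow_succ_log_self (by norm_num) n
    _ = 10 ^ Nat.log 10 n * 10 := pow_succ 10 _
    _ = 10 * 10 ^ Nat.log 10 n := Nat.mul_comm _ _

lemma bodyA_add (c i : Int) :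
    (let string := (PySem.Int.toStr i).toList
     if PySem.List.len string < 2 then c + 1
     else if PySem.List.pyGetD string 0 ' ' = PySem.List.pyGetD string (-1) ' ' then c + 1
     else c) = c + ind i := by
  by_cases hi : 0 ≤ i
  · have hcs : (PySem.Int.toStr i).toList = Nat.toDigits 10 i.toNat := by
      rw [PySem.Int.toList_toStr]
      simp [PySem.Int.toChars, not_lt.mpr hi]
    by_cases h10 : i < 10
    · have : i.toNat < 10 := by omega
      simp only [hcs, toDigits_small this, ind, PySem.List.len_eq]
      simp [hi, h10]
    · have hn10 : 10 ≤ i.toNat := by omega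
      have hlen := toDigits_len2 hn10
      obtain ⟨ch, cs', hc⟩ := List.exists_cons_of_ne_nil (toDigits_ne_nil i.toNat)
      have hch : ch = Nat.digitChar (leadN i.toNat) := by
        have := toDigits_head? i.toNat
        rw [hc] at this; simpa using this
      subst hch
      have hlast : ((leadN i.toNat).digitChar :: cs').getLast (List.cons_ne_nil _ _) =
          Nat.digitChar (i.toNat % 10) := by
        have h1 := toDigits_getLast? i.toNat
        rw [hc, List.getLast?_eq_some_getLast (h := List.cons_ne_nil _ _)] at h1
        exact Option.some.inj h1
      have hL : (2 : Int) ≤ (((leadN i.toNat).digitChar :: cs').length : Int) := by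
        rw [hc] at hlen; exact_mod_cast hlen
      simp only [hcs, hc, PySem.List.len_eq]
      rw [if_neg (by omega)]
      rw [PySem.List.pyGetD_zero, PySem.List.pyGetD_neg_one _ _ (List.cons_ne_nil _ _)]
      rw [List.getD_cons_zero, hlast]
      unfold ind
      by_cases heq : leadN i.toNat = i.toNat % 10
      · rw [if_pos (congrArg Nat.digitChar heq), if_pos ⟨hi, Or.inr heq⟩]
      · rw [if_neg (fun h => heq (digitChar_inj _ (leadN_lt _) _ (Nat.mod_lt _ (by norm_num)) h)),
          if_neg (by simp [h10, heq])]
        omega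
  · push_neg at hi
    have hcs : (PySem.Int.toStr i).toList = '-' :: Nat.toDigits 10 i.natAbs := by
      rw [PySem.Int.toList_toStr]
      simp [PySem.Int.toChars, hi]
    have hne := toDigits_ne_nil i.natAbs
    have hlen : 1 ≤ (Nat.toDigits 10 i.natAbs).length := List.length_pos_iff.mpr hne
    simp only [hcs, PySem.List.len_eq]
    rw [if_neg (by simp; omega)]
    rw [PySem.List.pyGetD_zero, PySem.List.pyGetD_neg_one _ _ (by simp)]
    rw [List.getLast_cons hne]
    have hlast : (Nat.toDigits 10 i.natAbs).getLast hne = Nat.digitChar (i.natAbs % 10) := by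
      have h1 := toDigits_getLast? i.natAbs
      rw [List.getLast?_eq_some_getLast (h := hne)] at h1
      exact Option.some.inj h1
    rw [if_neg (by
      rw [List.getD_cons_zero, hlast]
      intro h
      exact digitChar_ne_dash _ (Nat.mod_lt _ (by norm_num)) h.symm)]
    unfold ind
    rw [if_neg (fun h => absurd h.1 (not_le.mpr hi))]
    omega

lemma find_eq_sumInd (n m : Int) : find n m = sumInd n m := by
  suffices h : ∀ (k : Nat) (m : Int), (m + 1 - n).toNat = k → find n m = sumInd n m from
    h _ m rfl
  intro k
  induction k with
  | zero =>
    intro m hk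
    have hmn : m < n := by omega
    unfold find sumInd
    rw [PySem.List.pyRange_one_eq_nil (by omega), if_pos hmn]
    rfl
  | succ j ih =>
    intro m hk
    have hmn : n ≤ m := by omega
    have hfold : find n (m - 1) = sumInd n (m - 1) := ih (m - 1) (by omega)
    unfold find at hfold ⊢
    rw [show m - 1 + 1 = m by ring] at hfold
    rw [PySem.List.pyRange_one_succ_right hmn, List.foldl_append]
    simp only [List.foldl_cons, List.foldl_nil]
    rw [bodyA_add, hfold, sumInd_step n m hmn]

lemma fLoopB_char : ∀ (D : Nat) (t a r total p : Int), t = a * 10 ^ D + r → 1 ≤ a → a ≤ 9 →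
    0 ≤ r → r < 10 ^ D → fLoopB total p t = (total + p * (10 ^ D - 1), p * 10 ^ D, a) := by
  intro D
  induction D with
  | zero =>
    intro t a r total p ht ha1 ha9 hr0 hr
    have hr' : r = 0 := by omega
    rw [fLoopB, dif_neg (by omega)]
    simp [ht, hr']
  | succ E ih =>
    intro t a r total p ht ha1 ha9 hr0 hr
    have hP : (1 : Int) ≤ 10 ^ E := one_le_pow₀ (by norm_num)
    have hpow : (10 : Int) ^ (E + 1) = 10 ^ E * 10 := pow_succ 10 E
    have ht10 : 10 ≤ t := by nlinarith
    rw [fLoopB, dif_pos ht10]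
    have hdiv : PySem.Int.floordiv t 10 = a * 10 ^ E + r / 10 := by
      rw [PySem.Int.floordiv_eq_ediv_of_pos (by norm_num), ht, hpow]
      rw [show a * (10 ^ E * 10) + r = r + (a * 10 ^ E) * 10 by ring]
      rw [Int.add_mul_ediv_right _ _ (by norm_num)]
      ring
    rw [hdiv, ih _ a (r / 10) _ _ rfl ha1 ha9 (Int.ediv_nonneg hr0 (by norm_num))
      (by rw [hpow] at hr; omega)]
    refine Prod.ext ?_ (Prod.ext ?_ rfl) <;> simp <;> rw [hpow] <;> ring

lemma fB_closed (x a r : Int) (D : Nat) (hx : x = a * 10 ^ (D + 1) + r) (ha1 : 1 ≤ a)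
    (ha9 : a ≤ 9) (hr0 : 0 ≤ r) (hr : r < 10 ^ (D + 1)) :
    fB x = 9 + 10 ^ D + (a - 1) * 10 ^ D +
      (if a ≤ r then PySem.Int.floordiv (r - a) 10 + 1 else 0) := by
  have hP : (1 : Int) ≤ 10 ^ D := one_le_pow₀ (by norm_num)
  have hpow : (10 : Int) ^ (D + 1) = 10 ^ D * 10 := pow_succ 10 D
  have hx10 : 10 ≤ x := by nlinarith
  have hdiv : PySem.Int.floordiv x 10 = a * 10 ^ D + r / 10 := by
    rw [PySem.Int.floordiv_eq_ediv_of_pos (by norm_num), hx, hpow]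
    rw [show a * (10 ^ D * 10) + r = r + (a * 10 ^ D) * 10 by ring]
    rw [Int.add_mul_ediv_right _ _ (by norm_num)]
    ring
  rw [fB, if_neg (by omega), if_neg (by omega), hdiv,
    fLoopB_char D _ a (r / 10) 10 1 rfl ha1 ha9 (Int.ediv_nonneg hr0 (by norm_num))
      (by rw [hpow] at hr; omega)]
  simp only []
  have hrr : x - a * (1 * 10 ^ D * 10) = r := by rw [hx, hpow]; ring
  rw [hrr]
  split_ifs with h
  · rw [PySem.Int.floordiv_eq_ediv_of_pos (by norm_num)]; ring
  · ring

lemma fB_small (x : Int) (h0 : 0 ≤ x) (h10 : x < 10) : fB x = x + 1 := by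
  rw [fB, if_neg (by omega), if_pos h10]

lemma fB_neg (x : Int) (h : x < 0) : fB x = 0 := by
  rw [fB, if_pos h]

lemma ind_decomp (x : Int) (a r : Int) (D : Nat) (hx10 : 10 ≤ x)
    (hx : x = a * 10 ^ (D + 1) + r) (ha1 : 1 ≤ a) (ha9 : a ≤ 9) (hr0 : 0 ≤ r)
    (hr : r < 10 ^ (D + 1)) :
    ind x = if a = r % 10 then 1 else 0 := by
  have hcast : (((10 : Nat) ^ (D + 1) : Nat) : Int) = (10 : Int) ^ (D + 1) := by push_cast; ring
  have hcastD : (((10 : Nat) ^ D : Nat) : Int) = (10 : Int) ^ D := by push_cast; ring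
  have hpow : (10 : Int) ^ (D + 1) = 10 ^ D * 10 := pow_succ 10 D
  have hpowN : (10 : Nat) ^ (D + 1) = 10 ^ D * 10 := pow_succ 10 D
  have hP : (1 : Int) ≤ 10 ^ D := one_le_pow₀ (by norm_num)
  have hnt : x.toNat = a.toNat * 10 ^ (D + 1) + r.toNat := by
    have ha' : (a.toNat : Int) = a := Int.toNat_of_nonneg (by omega)
    have hr' : (r.toNat : Int) = r := Int.toNat_of_nonneg hr0
    have hxt : (x.toNat : Int) = x := Int.toNat_of_nonneg (by omega)
    have : (x.toNat : Int) = (a.toNat : Int) * (((10 : Nat) ^ (D + 1) : Nat) : Int) + (r.toNat : Int) := by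
      rw [ha', hr', hxt, hcast]; exact hx
    exact_mod_cast this
  have hlead : leadN x.toNat = a.toNat :=
    (lead_unique hnt (by omega) (by omega) (by omega)).2
  have hmod : x.toNat % 10 = r.toNat % 10 := by
    rw [hnt, hpowN,
      show a.toNat * (10 ^ D * 10) + r.toNat = r.toNat + a.toNat * 10 ^ D * 10 from by ring]
    omega
  unfold ind
  rw [if_congr (show (0 ≤ x ∧ (x < 10 ∨ leadN x.toNat = x.toNat % 10)) ↔ (a = r % 10) from by
    rw [hlead, hmod]
    constructor
    · rintro ⟨-, h | h⟩
      · omega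
      · omega
    · intro h
      exact ⟨by omega, Or.inr (by omega)⟩) rfl rfl]

lemma ind_neg (i : Int) (h : i < 0) : ind i = 0 := by
  rw [ind, if_neg (fun hc => absurd hc.1 (not_le.mpr h))]

lemma sumInd_nil (a b : Int) (h : b < a) : sumInd a b = 0 := by
  rw [sumInd, if_pos h]

lemma fB_step (x : Int) (hx : 0 ≤ x) : fB x = fB (x - 1) + ind x := by
  rcases lt_or_ge x 10 with h10 | h10
  · by_cases h0 : x = 0
    · subst h0
      rw [fB_small 0 (by omega) (by omega), fB_neg (0 - 1) (by omega),
        ind, if_pos ⟨le_refl 0, Or.inl (by norm_num)⟩]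
    · rw [fB_small x hx h10, fB_small (x - 1) (by omega) (by omega),
        ind, if_pos ⟨hx, Or.inl h10⟩]
      ring
  · by_cases hx10 : x = 10
    · subst hx10
      rw [fB_closed 10 1 0 0 (by norm_num) (by norm_num) (by norm_num) (by norm_num) (by norm_num),
        fB_small (10 - 1) (by norm_num) (by norm_num),
        ind_decomp 10 1 0 0 (by norm_num) (by norm_num) (by norm_num) (by norm_num) (by norm_num)
          (by norm_num)]
      norm_num
    · -- x ≥ 11 : decompose x.toNat in base 10
      have hnt0 : x.toNat ≠ 0 := by omega
      obtain ⟨E, hD⟩ : ∃ E, Nat.log 10 x.toNat = E + 1 := by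
        refine ⟨Nat.log 10 x.toNat - 1, ?_⟩
        have h1 : 1 ≤ Nat.log 10 x.toNat := by
          rw [← Nat.pow_le_iff_le_log (by norm_num) hnt0]
          omega
        omega
      have hple : 10 ^ (E + 1) ≤ x.toNat := hD ▸ Nat.pow_log_le_self 10 hnt0
      have hlt : x.toNat < 10 ^ (E + 1 + 1) := by
        have := Nat.lt_pow_succ_log_self (by norm_num : 1 < 10) x.toNat
        rwa [hD] at this
      have hPn : 0 < (10 : Nat) ^ (E + 1) := by positivity
      obtain ⟨na, nr, hdm, ha1, ha9, hrn⟩ :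
          ∃ na nr : Nat, x.toNat = na * 10 ^ (E + 1) + nr ∧ 1 ≤ na ∧ na ≤ 9 ∧
            nr < 10 ^ (E + 1) := by
        refine ⟨x.toNat / 10 ^ (E + 1), x.toNat % 10 ^ (E + 1),
          by rw [Nat.mul_comm]; exact (Nat.div_add_mod _ _).symm,
          (Nat.one_le_div_iff hPn).mpr hple, ?_, Nat.mod_lt _ hPn⟩
        have : x.toNat / 10 ^ (E + 1) < 10 := by
          rw [Nat.div_lt_iff_lt_mul hPn]
          calc x.toNat < 10 ^ (E + 1 + 1) := hlt
            _ = 10 ^ (E + 1) * 10 := pow_succ 10 _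
            _ ≤ 10 * 10 ^ (E + 1) := by rw [Nat.mul_comm]
        omega
      have hcast : (((10 : Nat) ^ (E + 1) : Nat) : Int) = (10 : Int) ^ (E + 1) := by
        push_cast; ring
      have hxI : x = (na : Int) * 10 ^ (E + 1) + (nr : Int) := by
        have h1 := congrArg (Nat.cast : Nat → Int) hdm
        push_cast at h1
        rwa [Int.toNat_of_nonneg hx] at h1
      have hA1 : (1 : Int) ≤ (na : Int) := by exact_mod_cast ha1
      have hA9 : (na : Int) ≤ 9 := by exact_mod_cast ha9
      have hR0 : (0 : Int) ≤ (nr : Int) := by positivity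
      have hRlt : (nr : Int) < 10 ^ (E + 1) := by
        rw [← hcast]
        exact_mod_cast hrn
      have hQ1 : (1 : Int) ≤ 10 ^ E := one_le_pow₀ (by norm_num)
      have hpow : (10 : Int) ^ (E + 1) = 10 ^ E * 10 := pow_succ 10 E
      have hx11 : 11 ≤ x := by omega
      rw [ind_decomp x (na : Int) (nr : Int) E (by omega) hxI hA1 hA9 hR0 hRlt,
        fB_closed x (na : Int) (nr : Int) E hxI hA1 hA9 hR0 hRlt]
      by_cases hR1 : 1 ≤ (nr : Int)
      · -- same leading digit and length for x-1
        rw [fB_closed (x - 1) (na : Int) ((nr : Int) - 1) E (by rw [hxI]; ring) hA1 hA9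
          (by omega) (by omega)]
        simp only [PySem.Int.floordiv_eq_ediv_of_pos (show (0:Int) < 10 by norm_num)]
        rw [hpow] at hRlt
        split_ifs <;> omega
      · have hR0' : nr = 0 := by omega
        subst hR0'
        by_cases hA2 : 2 ≤ (na : Int)
        · -- x-1 loses one from the leading digit, trailing 9s
          rw [fB_closed (x - 1) ((na : Int) - 1) (10 ^ (E + 1) - 1) E (by rw [hxI]; ring)
            (by omega) (by omega) (by omega) (by omega)]
          rw [if_neg (by push_cast; omega), if_pos (by rw [hpow]; omega), if_neg (by push_cast; omega)]
          rw [PySem.Int.floordiv_eq_ediv_of_pos (show (0:Int) < 10 by norm_num)]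
          have hdiv : (10 ^ (E + 1) - 1 - ((na : Int) - 1)) / 10 = 10 ^ E - 1 := by
            rw [hpow]; omega
          rw [hdiv]
          ring
        · -- x = 10^(E+1) : one digit fewer in x-1, all 9s
          have hAe : na = 1 := by omega
          subst hAe
          obtain ⟨F, rfl⟩ : ∃ F, E = F + 1 := by
            refine ⟨E - 1, ?_⟩
            rcases Nat.eq_zero_or_pos E with h | h
            · exfalso; rw [h] at hxI; norm_num at hxI; omega
            · omega
          have hQF : (1 : Int) ≤ 10 ^ F := one_le_pow₀ (by norm_num)
          have hpowF : (10 : Int) ^ (F + 1) = 10 ^ F * 10 := pow_succ 10 F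
          rw [fB_closed (x - 1) 9 (10 ^ (F + 1) - 1) F
            (by rw [hxI, pow_succ (10 : Int) (F + 1)]; ring) (by norm_num) (by norm_num)
            (by rw [hpowF]; omega) (by omega)]
          have h10F : (10 : Int) ≤ 10 ^ (F + 1) := by
            calc (10 : Int) = 1 * 10 := by ring
              _ ≤ 10 ^ F * 10 := by nlinarith
              _ = 10 ^ (F + 1) := (pow_succ 10 F).symm
          push_cast
          simp only [PySem.Int.floordiv_eq_ediv_of_pos (show (0:Int) < 10 by norm_num)]
          rw [if_pos (show (9:Int) ≤ 10 ^ (F + 1) - 1 from by omega)]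
          have hdiv : ((10:Int) ^ (F + 1) - 1 - 9) / 10 = 10 ^ F - 1 := by
            rw [hpowF]; omega
          rw [hdiv, hpowF]
          ring

lemma fB_sum (x : Int) (hx : -1 ≤ x) : fB x = sumInd 0 x := by
  suffices h : ∀ (k : Nat) (x : Int), -1 ≤ x → (x + 1).toNat = k → fB x = sumInd 0 x from
    h _ x hx rfl
  intro k
  induction k with
  | zero =>
    intro x hx hk
    have : x = -1 := by omega
    subst this
    rw [fB_neg _ (by norm_num), sumInd_nil _ _ (by norm_num)]
  | succ j ih =>
    intro x hx hk
    have hx0 : 0 ≤ x := by omega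
    rw [fB_step x hx0, ih (x - 1) (by omega) (by omega), ← sumInd_step 0 x hx0]

lemma sumInd_left (n m : Int) (hn : n ≤ 0) : sumInd n m = sumInd 0 m := by
  suffices h : ∀ (k : Nat) (m : Int), (m + 1 - n).toNat = k → sumInd n m = sumInd 0 m from
    h _ m rfl
  intro k
  induction k with
  | zero =>
    intro m hk
    rw [sumInd_nil _ _ (by omega), sumInd_nil _ _ (by omega)]
  | succ j ih =>
    intro m hk
    have hnm : n ≤ m := by omega
    rw [sumInd_step n m hnm, ih (m - 1) (by omega)]
    by_cases hm : 0 ≤ m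
    · rw [← sumInd_step 0 m hm]
    · rw [ind_neg m (by omega), sumInd_nil 0 (m - 1) (by omega), sumInd_nil 0 m (by omega)]
      ring

lemma sumInd_split (lo m : Int) (h0 : 0 ≤ lo) (hm : lo ≤ m + 1) :
    sumInd 0 m = sumInd 0 (lo - 1) + sumInd lo m := by
  suffices h : ∀ (k : Nat) (m : Int), lo ≤ m + 1 → (m + 1 - lo).toNat = k →
      sumInd 0 m = sumInd 0 (lo - 1) + sumInd lo m from h _ m hm rfl
  intro k
  induction k with
  | zero =>
    intro m hm hk
    have : m = lo - 1 := by omega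
    subst this
    rw [sumInd_nil lo (lo - 1) (by omega)]
    ring
  | succ j ih =>
    intro m hm hk
    have hlom : lo ≤ m := by omega
    rw [sumInd_step 0 m (by omega), ih (m - 1) (by omega) (by omega), sumInd_step lo m hlom]
    ring

lemma find_alt_eq_sumInd (n m : Int) : find_alt n m = sumInd n m := by
  by_cases hn : n < 0
  · simp only [find_alt, if_pos hn]
    by_cases hm : 0 > m
    · rw [if_pos hm, sumInd_left n m (by omega), sumInd_nil 0 m (by omega)]
    · rw [if_neg hm, fB_sum m (by omega), fB_neg (0 - 1) (by norm_num),
        sumInd_left n m (by omega)]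
      ring
  · simp only [find_alt, if_neg hn]
    by_cases hm : n > m
    · rw [if_pos hm, sumInd_nil n m (by omega)]
    · rw [if_neg hm, fB_sum m (by omega), fB_sum (n - 1) (by omega),
        sumInd_split n m (by omega) (by omega)]
      ring


-- ===== VERDICT (by name: the statement is the Claim_ definition above) =====
theorem find_spec : Claim_equal_find := by
  intro n m _
  unfold Spec_find
  rw [find_eq_sumInd, find_alt_eq_sumInd]
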